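-- pv_equiv track=rewrite | github.com/Yosshi999/ARCGolfVisualizer | outputs/task044/1182_20250811223931.py | f
-- ===== SOURCE A (Python) =====
-- def f(g,i,j):
--  W=H=0
--  while j+W<10and g[i][j+W]==5:W+=1
--  while i+H<10and g[i+H][j]==5:H+=1
--  m=n=10;M=N=0
--  for I in range(i,i+H):
--   for J in range(j,j+W):
--    if g[I][J]==0:
--     m=min(m,I);n=min(n,J);M=max(M,I);N=max(N,J)
--  return H,W,m,n,[r[n:N+1]for r in g[m:M+1]]
-- ===== SOURCE B (Python) =====
-- def _w(g, i, p):
--     # length of the run of 5s in row i from column p, recursively (stops at column 10)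
--     return 0 if p >= 10 or g[i][p] != 5 else 1 + _w(g, i, p + 1)
--
-- def _h(g, j, p):
--     # length of the run of 5s in column j from row p, recursively (stops at row 10)
--     return 0 if p >= 10 or g[p][j] != 5 else 1 + _h(g, j, p + 1)
--
-- def f(g, i, j):
--     W = _w(g, i, j)
--     H = _h(g, j, i)
--     rows = [I for I in range(i, i + H) if 0 in g[I][j:j + W]]
--     if not rows:
--         m = n = 10
--         M = N = 0
--     else:
--         m, M = rows[0], rows[-1]
--         cols = [J for J in range(j, j + W) if any(g[I][J] == 0 for I in rows)]
--         n, N = cols[0], cols[-1]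
--     return H, W, m, n, [r[n:N + 1] for r in g[m:M + 1]]
-- ===== Notes on version B (the rewrite author's own statement) =====
-- stated objective: alternative
-- what changed: W and H are computed by recursive run-length helpers instead of index-bumping while loops, and the zero bounding box is computed by projection -- the list of zero-containing rows (via '0 in' on a row slice) and the list of zero-containing columns, the box being the first/last element of each projection -- instead of four running min/max accumulators updated per cell in nested loops.
import Mathlib
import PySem

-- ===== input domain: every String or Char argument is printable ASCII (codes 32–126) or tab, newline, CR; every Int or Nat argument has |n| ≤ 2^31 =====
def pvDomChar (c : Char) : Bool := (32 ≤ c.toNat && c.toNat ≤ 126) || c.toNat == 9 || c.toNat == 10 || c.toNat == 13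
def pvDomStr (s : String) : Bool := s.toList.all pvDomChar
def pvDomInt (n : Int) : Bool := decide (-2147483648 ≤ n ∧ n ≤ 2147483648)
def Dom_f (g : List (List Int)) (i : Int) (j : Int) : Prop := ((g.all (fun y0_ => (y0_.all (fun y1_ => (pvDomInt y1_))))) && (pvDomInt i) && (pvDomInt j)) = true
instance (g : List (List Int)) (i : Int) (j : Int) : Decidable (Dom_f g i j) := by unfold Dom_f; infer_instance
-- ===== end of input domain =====

-- B computes the 5-run lengths recursively and the zero bounding box by projection:
-- the list of zero-containing rows and the list of zero-containing columns, with the box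
-- given by the first/last element of each projection instead of per-cell running min/max
-- accumulators; same cost, different algorithm ("alternative").

-- ===== PORT A =====
-- g[r][c] as an Option (none = IndexError); shared indexing helper for both ports
def cellZ (g : List (List Int)) (r c : Int) : Option Int :=
  (PySem.List.pyGet? g r).bind (fun row => PySem.List.pyGet? row c)

-- `while j+W<10 and g[i][j+W]==5: W+=1` — p is j+W; returns the number of iterations
def whileW (g : List (List Int)) (i : Int) (p : Int) : Nat → Int
  | 0 => 0
  | fu+1 => if p < 10 ∧ cellZ g i p = some 5 then 1 + whileW g i (p+1) fu else 0

-- `while i+H<10 and g[i+H][j]==5: H+=1` — p is i+H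
def whileH (g : List (List Int)) (j : Int) (p : Int) : Nat → Int
  | 0 => 0
  | fu+1 => if p < 10 ∧ cellZ g p j = some 5 then 1 + whileH g j (p+1) fu else 0

def f (g : List (List Int)) (i : Int) (j : Int) : Int × Int × Int × Int × List (List Int) :=
  let W := whileW g i j (10 - j).toNat
  let H := whileH g j i (10 - i).toNat
  let acc := (PySem.List.pyRange i (i+H) 1).foldl (fun acc I =>
      (PySem.List.pyRange j (j+W) 1).foldl (fun acc J =>
        if cellZ g I J = some 0 then
          (min acc.1 I, min acc.2.1 J, max acc.2.2.1 I, max acc.2.2.2 J)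
        else acc) acc)
    ((10 : Int), (10 : Int), (0 : Int), (0 : Int))
  (H, W, acc.1, acc.2.1,
    (PySem.List.slice g (some acc.1) (some (acc.2.2.1 + 1))).map
      (fun r => PySem.List.slice r (some acc.2.1) (some (acc.2.2.2 + 1))))

-- ===== PORT B =====
-- `_w`: 0 if p >= 10 or g[i][p] != 5 else 1 + _w(g, i, p+1)  (fuel = 10 - p, supplied by f_alt)
def runW (g : List (List Int)) (i : Int) (p : Int) : Nat → Int
  | 0 => 0
  | fu+1 => if 10 ≤ p ∨ ¬ cellZ g i p = some 5 then 0 else 1 + runW g i (p+1) fu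

-- `_h`: 0 if p >= 10 or g[p][j] != 5 else 1 + _h(g, j, p+1)
def runH (g : List (List Int)) (j : Int) (p : Int) : Nat → Int
  | 0 => 0
  | fu+1 => if 10 ≤ p ∨ ¬ cellZ g p j = some 5 then 0 else 1 + runH g j (p+1) fu

-- rows = [I for I in R if 0 in g[I][j:j+W]]
def zrows (g : List (List Int)) (j W : Int) (R : List Int) : List Int :=
  R.filter (fun I =>
    (PySem.List.slice ((PySem.List.pyGet? g I).getD []) (some j) (some (j+W))).contains 0)

-- cols = [J for J in C if any(g[I][J] == 0 for I in rows)]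
def zcols (g : List (List Int)) (rows : List Int) (C : List Int) : List Int :=
  C.filter (fun J => rows.any (fun I => cellZ g I J == some 0))

-- the bounding-box quadruple (m, n, M, N); rows/cols first/last (Python rows[0], rows[-1],
-- cols[0], cols[-1]; cols is provably nonempty whenever rows is, under Pre_f, so the
-- headD/getLastD defaults are unreachable there)
def bbox2 (g : List (List Int)) (j W : Int) : List Int → Int × Int × Int × Int
  | [] => ((10 : Int), (10 : Int), (0 : Int), (0 : Int))
  | I :: rest =>
      let cols := zcols g (I :: rest) (PySem.List.pyRange j (j+W) 1)
      (I, cols.headD 0, rest.getLastD I, cols.getLastD 0)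

def bbox (g : List (List Int)) (i j W H : Int) : Int × Int × Int × Int :=
  bbox2 g j W (zrows g j W (PySem.List.pyRange i (i+H) 1))

def f_alt (g : List (List Int)) (i : Int) (j : Int) : Int × Int × Int × Int × List (List Int) :=
  let W := runW g i j (10 - j).toNat
  let H := runH g j i (10 - i).toNat
  let q := bbox g i j W H
  (H, W, q.1, q.2.1,
    (PySem.List.slice g (some q.1) (some (q.2.2.1 + 1))).map
      (fun r => PySem.List.slice r (some q.2.1) (some (q.2.2.2 + 1))))

-- ===== PRECONDITION & SPEC =====
-- Pre_f admits the function's natural domain (ARC: a 10×10 grid with the start cell inside it, as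
-- the hard-coded 10s show) plus the degenerate inputs both programs accept: a start past the
-- 10×10 window, or a readable start cell (Python indexing, negative wrap included) with a non-5
-- value; it excludes inputs where A raises IndexError and exotic non-10×10 grids whose start
-- cell is a 5 reached by negative wraparound, where A's per-index walk and B's clamped row
-- slices read different cells.
def Pre_f (g : List (List Int)) (i : Int) (j : Int) : Prop :=
  (g.length = 10 ∧ (∀ r ∈ g, r.length = 10) ∧ 0 ≤ i ∧ i < 10 ∧ 0 ≤ j ∧ j < 10)
  ∨ (10 ≤ i ∧ 10 ≤ j)
  ∨ (-(g.length : Int) ≤ i ∧ i < g.length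
     ∧ -((g.getD (PySem.List.clampIdx g.length i) []).length : Int) ≤ j
     ∧ j < ((g.getD (PySem.List.clampIdx g.length i) []).length : Int)
     ∧ (g.getD (PySem.List.clampIdx g.length i) []).getD
         (PySem.List.clampIdx (g.getD (PySem.List.clampIdx g.length i) []).length j) 0 ≠ 5)
instance (g : List (List Int)) (i : Int) (j : Int) : Decidable (Pre_f g i j) := by
  unfold Pre_f; infer_instance

def pvWitness_f : List (List Int) × Int × Int :=
  ([[5,5,0,1,1,1,1,1,1,1],[5,0,5,1,1,1,1,1,1,1],[5,5,5,1,1,1,1,1,1,1],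
    [1,1,1,1,1,1,1,1,1,1],[1,1,1,1,1,1,1,1,1,1],[1,1,1,1,1,1,1,1,1,1],
    [1,1,1,1,1,1,1,1,1,1],[1,1,1,1,1,1,1,1,1,1],[1,1,1,1,1,1,1,1,1,1],
    [1,1,1,1,1,1,1,1,1,1]], 0, 0)

def Spec_f (g : List (List Int)) (i : Int) (j : Int) (out : Int × Int × Int × Int × List (List Int)) : Prop := out = f_alt g i j
instance (g : List (List Int)) (i : Int) (j : Int) (out : Int × Int × Int × Int × List (List Int)) : Decidable (Spec_f g i j out) := by unfold Spec_f; infer_instance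

-- ===== CLAIM (what is proved, stated in full; the proofs are below) =====
def Claim_equal_f : Prop := ∀ (g : List (List Int)) (i : Int) (j : Int), Dom_f g i j → Pre_f g i j → Spec_f g i j (f g i j)

-- ===== LEMMAS AND PROOFS =====

-- B's recursive run-length helpers compute A's while-loop counters (complementary guards)
theorem runW_eq_whileW (g : List (List Int)) (i : Int) :
    ∀ (fu : Nat) (p : Int), runW g i p fu = whileW g i p fu := by
  intro fu
  induction fu with
  | zero => intro p; rfl
  | succ n ih =>
    intro p
    by_cases h : p < 10 ∧ cellZ g i p = some 5
    · have h' : ¬ (10 ≤ p ∨ ¬ cellZ g i p = some 5) := by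
        rintro (h1 | h2)
        · omega
        · exact h2 h.2
      simp [runW, whileW, h, ih]
    · have h' : 10 ≤ p ∨ ¬ cellZ g i p = some 5 := by
        rcases not_and_or.mp h with h1 | h2
        · exact Or.inl (by omega)
        · exact Or.inr h2
      simp [runW, whileW, h, h']

theorem runH_eq_whileH (g : List (List Int)) (j : Int) :
    ∀ (fu : Nat) (p : Int), runH g j p fu = whileH g j p fu := by
  intro fu
  induction fu with
  | zero => intro p; rfl
  | succ n ih =>
    intro p
    by_cases h : p < 10 ∧ cellZ g p j = some 5
    · have h' : ¬ (10 ≤ p ∨ ¬ cellZ g p j = some 5) := by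
        rintro (h1 | h2)
        · omega
        · exact h2 h.2
      simp [runH, whileH, h, ih]
    · have h' : 10 ≤ p ∨ ¬ cellZ g p j = some 5 := by
        rcases not_and_or.mp h with h1 | h2
        · exact Or.inl (by omega)
        · exact Or.inr h2
      simp [runH, whileH, h, h']

-- the while-loop counters stay within [0, fuel]
theorem whileW_bounds (g : List (List Int)) (i : Int) :
    ∀ (fu : Nat) (p : Int), 0 ≤ whileW g i p fu ∧ whileW g i p fu ≤ fu := by
  intro fu
  induction fu with
  | zero => intro p; simp [whileW]
  | succ n ih =>
    intro p
    by_cases h : p < 10 ∧ cellZ g i p = some 5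
    · have := ih (p+1); simp [whileW, h]; omega
    · simp [whileW, h]; omega

theorem whileH_bounds (g : List (List Int)) (j : Int) :
    ∀ (fu : Nat) (p : Int), 0 ≤ whileH g j p fu ∧ whileH g j p fu ≤ fu := by
  intro fu
  induction fu with
  | zero => intro p; simp [whileH]
  | succ n ih =>
    intro p
    by_cases h : p < 10 ∧ cellZ g p j = some 5
    · have := ih (p+1); simp [whileH, h]; omega
    · simp [whileH, h]; omega

theorem whileW_stop (g : List (List Int)) (i p : Int) (fuel : Nat)
    (h : ¬ cellZ g i p = some 5) : whileW g i p fuel = 0 := by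
  cases fuel <;> simp [whileW, h]

theorem whileH_stop (g : List (List Int)) (j p : Int) (fuel : Nat)
    (h : ¬ cellZ g p j = some 5) : whileH g j p fuel = 0 := by
  cases fuel <;> simp [whileH, h]

-- pyGet? at a nonnegative in-range index
theorem pyGet?_of_lt {a : Type} (xs : List a) (p : Int) (h0 : 0 <= p) (h : p.toNat < xs.length) :
    PySem.List.pyGet? xs p = some (xs[p.toNat]) := by
  obtain ⟨k, rfl⟩ := Int.eq_ofNat_of_zero_le h0
  rw [PySem.List.pyGet?_natCast]
  simp

-- combined min/max accumulator step, as a function of the zero coordinate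
def step4 (acc : Int × Int × Int × Int) (z : Int × Int) : Int × Int × Int × Int :=
  (min acc.1 z.1, min acc.2.1 z.2, max acc.2.2.1 z.1, max acc.2.2.2 z.2)

-- A's guarded inner fold is step4 folded over the filtered coordinates
theorem inner_eq (g : List (List Int)) (I : Int) :
    ∀ (Rj : List Int) (acc : Int × Int × Int × Int),
    Rj.foldl (fun acc J => if cellZ g I J = some 0 then
        (min acc.1 I, min acc.2.1 J, max acc.2.2.1 I, max acc.2.2.2 J) else acc) acc
    = (Rj.filterMap (fun J => if cellZ g I J = some 0 then some (I, J) else none)).foldl step4 acc := by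
  intro Rj
  induction Rj with
  | nil => intro acc; simp
  | cons J Js ih =>
    intro acc
    by_cases h : cellZ g I J = some 0
    · simp only [List.foldl_cons, List.filterMap_cons, if_pos h]
      rw [ih]
      rfl
    · simp only [List.foldl_cons, List.filterMap_cons, if_neg h]
      exact ih acc

-- a step4 fold splits into four independent min/max folds
theorem foldl_step4 : ∀ (zs : List (Int × Int)) (a b c d : Int),
    zs.foldl step4 (a, b, c, d)
    = ((zs.map Prod.fst).foldl min a, (zs.map Prod.snd).foldl min b,
       (zs.map Prod.fst).foldl max c, (zs.map Prod.snd).foldl max d) := by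
  intro zs
  induction zs with
  | nil => intro a b c d; rfl
  | cons z rest ih => intro a b c d; simp only [List.foldl_cons, List.map_cons, step4]; exact ih _ _ _ _

-- A's guarded double fold over the ranges is a step4 fold over the collected zero list
theorem outer_eq (g : List (List Int)) (i j a b : Int) (init : Int × Int × Int × Int) :
    (PySem.List.pyRange i a 1).foldl (fun acc I =>
        (PySem.List.pyRange j b 1).foldl (fun acc J => if cellZ g I J = some 0 then
          (min acc.1 I, min acc.2.1 J, max acc.2.2.1 I, max acc.2.2.2 J) else acc) acc) init
    = ((PySem.List.pyRange i a 1).flatMap (fun I => (PySem.List.pyRange j b 1).filterMap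
        (fun J => if cellZ g I J = some 0 then some (I, J) else none))).foldl step4 init := by
  rw [List.foldl_flatMap]
  exact PySem.List.foldl_congr_mem _ _ _ _ (fun acc I _ => inner_eq g I _ acc)

-- coordinate membership in the collected zero list
theorem mem_zs_iff (g : List (List Int)) (i j a b : Int) (w : Int × Int) :
    w ∈ (PySem.List.pyRange i a 1).flatMap (fun I => (PySem.List.pyRange j b 1).filterMap
        (fun J => if cellZ g I J = some 0 then some (I, J) else none))
    ↔ w.1 ∈ PySem.List.pyRange i a 1 ∧ w.2 ∈ PySem.List.pyRange j b 1 ∧ cellZ g w.1 w.2 = some 0 := by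
  simp only [List.mem_flatMap, List.mem_filterMap]
  constructor
  · rintro ⟨I, hI, J, hJ, hw⟩
    by_cases h : cellZ g I J = some 0
    · rw [if_pos h] at hw
      cases hw
      exact ⟨hI, hJ, h⟩
    · rw [if_neg h] at hw
      cases hw
  · rintro ⟨h1, h2, h3⟩
    exact ⟨w.1, h1, w.2, h2, by simp [h3]⟩

-- fold of min with a lower-bounding start value
theorem foldl_min_head : ∀ (l : List Int) (x : Int), (∀ y ∈ l, x <= y) → l.foldl min x = x := by
  intro l
  induction l with
  | nil => intro x _; rfl
  | cons y ys ih =>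
    intro x h
    simp only [List.foldl_cons]
    have hxy : min x y = x := min_eq_left (h y (by simp))
    rw [hxy]
    exact ih x (fun z hz => h z (by simp [hz]))

theorem foldl_max_head : ∀ (l : List Int) (x : Int), (∀ y ∈ l, y <= x) → l.foldl max x = x := by
  intro l
  induction l with
  | nil => intro x _; rfl
  | cons y ys ih =>
    intro x h
    simp only [List.foldl_cons]
    have hxy : max x y = x := max_eq_left (h y (by simp))
    rw [hxy]
    exact ih x (fun z hz => h z (by simp [hz]))

-- a min-fold lands on the minimum element when the start value dominates it
theorem fold_min_eq : ∀ (l : List Int) (a m : Int), m ∈ l → (∀ y ∈ l, m ≤ y) → m ≤ a →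
    l.foldl min a = m := by
  intro l
  induction l with
  | nil => intro a m hm; simp at hm
  | cons x xs ih =>
    intro a m hm hle ha
    simp only [List.foldl_cons]
    by_cases hx : m ∈ xs
    · exact ih (min a x) m hx (fun y hy => hle y (by simp [hy])) (le_min ha (hle x (by simp)))
    · have hmx : m = x := by
        rcases List.mem_cons.mp hm with h | h
        · exact h
        · exact absurd h hx
      subst hmx
      rw [min_eq_right ha]
      exact foldl_min_head xs m (fun y hy => hle y (by simp [hy]))

theorem fold_max_eq : ∀ (l : List Int) (b m : Int), m ∈ l → (∀ y ∈ l, y ≤ m) → b ≤ m →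
    l.foldl max b = m := by
  intro l
  induction l with
  | nil => intro b m hm; simp at hm
  | cons x xs ih =>
    intro b m hm hle hb
    simp only [List.foldl_cons]
    by_cases hx : m ∈ xs
    · exact ih (max b x) m hx (fun y hy => hle y (by simp [hy])) (max_le hb (hle x (by simp)))
    · have hmx : m = x := by
        rcases List.mem_cons.mp hm with h | h
        · exact h
        · exact absurd h hx
      subst hmx
      rw [max_eq_right hb]
      exact foldl_max_head xs m (fun y hy => hle y (by simp [hy]))

-- getLastD of a strictly sorted cons is its maximum
theorem sorted_le_getLastD : ∀ (l : List Int) (x : Int), (x :: l).Pairwise (· < ·) →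
    ∀ y ∈ x :: l, y ≤ l.getLastD x := by
  intro l
  induction l with
  | nil => intro x _ y hy; simp at hy; simp [hy]
  | cons z zs ih =>
    intro x hpw y hy
    rw [List.getLastD_cons]
    have hpc := List.pairwise_cons.mp hpw
    rcases List.mem_cons.mp hy with h | h
    · subst h
      calc y ≤ z := le_of_lt (hpc.1 z (by simp))
        _ ≤ zs.getLastD z := ih z hpc.2 z (by simp)
    · exact ih z hpc.2 y h

-- a min-fold over any list with the same members as a sorted list is that list's head
theorem fold_min_sorted (l s : List Int) (a : Int) (hmem : ∀ x, x ∈ l ↔ x ∈ s)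
    (hs : s.Pairwise (· < ·)) (ha : ∀ x ∈ s, x ≤ a) : l.foldl min a = s.headD a := by
  cases s with
  | nil =>
    have hl : l = [] := by
      cases l with
      | nil => rfl
      | cons z zs => exact absurd ((hmem z).mp (by simp)) (by simp)
    subst hl; rfl
  | cons x rest =>
    rw [List.headD_cons]
    have hle : ∀ y ∈ l, x ≤ y := by
      intro y hy
      rcases List.mem_cons.mp ((hmem y).mp hy) with h | h
      · exact le_of_eq h.symm
      · exact le_of_lt ((List.pairwise_cons.mp hs).1 y h)
    exact fold_min_eq l a x ((hmem x).mpr (by simp)) hle (ha x (by simp))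

-- a max-fold over any list with the same members as a sorted list is that list's last
theorem fold_max_sorted (l s : List Int) (b : Int) (hmem : ∀ x, x ∈ l ↔ x ∈ s)
    (hs : s.Pairwise (· < ·)) (hb : ∀ x ∈ s, b ≤ x) : l.foldl max b = s.getLastD b := by
  cases s with
  | nil =>
    have hl : l = [] := by
      cases l with
      | nil => rfl
      | cons z zs => exact absurd ((hmem z).mp (by simp)) (by simp)
    subst hl; rfl
  | cons x rest =>
    rw [List.getLastD_cons]
    have hlast : rest.getLastD x ∈ x :: rest := List.getLastD_mem_cons
    have hm : rest.getLastD x ∈ l := (hmem _).mpr hlast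
    have hle : ∀ y ∈ l, y ≤ rest.getLastD x := fun y hy =>
      sorted_le_getLastD rest x hs y ((hmem y).mp hy)
    exact fold_max_eq l b _ hm hle (hb _ hlast)

-- 0 ∈ row[j:j+W]  ↔  some column J in range(j, j+W) holds a zero (10-long row, bounds in range)
theorem contains_slice_eq_any (g : List (List Int)) (I j W : Int) (h0 : 0 ≤ I)
    (hI : I.toNat < g.length) (hrow : (g[I.toNat]).length = 10)
    (hj : 0 ≤ j) (hW : 0 ≤ W) (hjW : j + W ≤ 10) :
    ((PySem.List.slice ((PySem.List.pyGet? g I).getD []) (some j) (some (j+W))).contains 0)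
      = (PySem.List.pyRange j (j+W) 1).any (fun J => cellZ g I J == some 0) := by
  have hrowget : PySem.List.pyGet? g I = some (g[I.toNat]) := pyGet?_of_lt g I h0 hI
  rw [hrowget, Option.getD_some, PySem.List.slice_toNat _ hj (by omega)]
  apply Bool.eq_iff_iff.mpr
  rw [List.contains_iff_mem, List.any_eq_true]
  constructor
  · intro hmem
    obtain ⟨k, hk, hget⟩ := List.mem_iff_getElem.mp hmem
    have hk' : k < (j+W).toNat - j.toNat ∧ j.toNat + k < 10 := by
      have := hk
      simp [hrow] at this
      omega
    refine ⟨j + (k : Int), PySem.List.mem_pyRange_one.mpr ⟨by omega, by omega⟩, ?_⟩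
    have hcell : cellZ g I (j + (k : Int))
        = some ((g[I.toNat])[(j + (k : Int)).toNat]'(by omega)) := by
      simp only [cellZ, hrowget, Option.bind_some]
      rw [pyGet?_of_lt _ _ (by omega) (by omega)]
    rw [List.getElem_take, List.getElem_drop] at hget
    rw [hcell, beq_iff_eq, Option.some_inj]
    convert hget using 2
    omega
  · rintro ⟨J, hJ, hcell⟩
    obtain ⟨hJ1, hJ2⟩ := PySem.List.mem_pyRange_one.mp hJ
    have hJt : J.toNat < 10 := by omega
    have hcell' : cellZ g I J = some ((g[I.toNat])[J.toNat]'(by omega)) := by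
      simp only [cellZ, hrowget, Option.bind_some]
      rw [pyGet?_of_lt _ _ (by omega) (by omega)]
    rw [hcell', beq_iff_eq, Option.some_inj] at hcell
    apply List.mem_iff_getElem.mpr
    obtain ⟨k, hk⟩ : ∃ k : Nat, J.toNat = j.toNat + k := ⟨J.toNat - j.toNat, by omega⟩
    refine ⟨k, by simp [hrow]; omega, ?_⟩
    rw [List.getElem_take, List.getElem_drop]
    convert hcell using 2
    omega

-- the central bridge: A's accumulator quadruple is B's projection quadruple
theorem main_quad (g : List (List Int)) (i j W H : Int)
    (hR : ∀ I ∈ PySem.List.pyRange i (i+H) 1, 0 ≤ I ∧ I < 10)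
    (hC : ∀ J ∈ PySem.List.pyRange j (j+W) 1, 0 ≤ J ∧ J < 10)
    (hbridge : ∀ I ∈ PySem.List.pyRange i (i+H) 1,
      ((PySem.List.slice ((PySem.List.pyGet? g I).getD []) (some j) (some (j+W))).contains 0)
        = (PySem.List.pyRange j (j+W) 1).any (fun J => cellZ g I J == some 0)) :
    (PySem.List.pyRange i (i+H) 1).foldl (fun acc I =>
        (PySem.List.pyRange j (j+W) 1).foldl (fun acc J =>
          if cellZ g I J = some 0 then
            (min acc.1 I, min acc.2.1 J, max acc.2.2.1 I, max acc.2.2.2 J)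
          else acc) acc)
      ((10 : Int), (10 : Int), (0 : Int), (0 : Int))
    = bbox g i j W H := by
  rw [outer_eq, foldl_step4]
  unfold bbox
  have hfilter : zrows g j W (PySem.List.pyRange i (i+H) 1)
      = (PySem.List.pyRange i (i+H) 1).filter
          (fun I => (PySem.List.pyRange j (j+W) 1).any (fun J => cellZ g I J == some 0)) := by
    unfold zrows
    exact List.filter_congr hbridge
  rw [hfilter]
  -- abbreviations purely for the proof text
  set R := PySem.List.pyRange i (i+H) 1 with hRdef
  set C := PySem.List.pyRange j (j+W) 1 with hCdef
  set rows := R.filter (fun I => C.any (fun J => cellZ g I J == some 0)) with hrowsdef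
  set zs := R.flatMap (fun I => C.filterMap
      (fun J => if cellZ g I J = some 0 then some (I, J) else none)) with hzsdef
  have hrowsmem : ∀ x, x ∈ rows ↔ x ∈ R ∧ ∃ J ∈ C, cellZ g x J = some 0 := by
    intro x
    rw [hrowsdef, List.mem_filter, List.any_eq_true]
    simp only [beq_iff_eq]
  have hfst : ∀ x, x ∈ zs.map Prod.fst ↔ x ∈ rows := by
    intro x
    rw [List.mem_map, hrowsmem]
    constructor
    · rintro ⟨w, hw, rfl⟩
      obtain ⟨h1, h2, h3⟩ := (mem_zs_iff g i j (i+H) (j+W) w).mp hw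
      exact ⟨h1, w.2, h2, h3⟩
    · rintro ⟨h1, J, hJ, hcell⟩
      exact ⟨(x, J), (mem_zs_iff g i j (i+H) (j+W) (x, J)).mpr ⟨h1, hJ, hcell⟩, rfl⟩
  have hsnd : ∀ x, x ∈ zs.map Prod.snd ↔
      x ∈ C.filter (fun J => rows.any (fun I => cellZ g I J == some 0)) := by
    intro x
    rw [List.mem_map, List.mem_filter, List.any_eq_true]
    constructor
    · rintro ⟨w, hw, rfl⟩
      obtain ⟨h1, h2, h3⟩ := (mem_zs_iff g i j (i+H) (j+W) w).mp hw
      refine ⟨h2, w.1, ?_, by simpa using h3⟩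
      exact (hrowsmem w.1).mpr ⟨h1, w.2, h2, h3⟩
    · rintro ⟨hx, I, hI, hcell⟩
      rw [beq_iff_eq] at hcell
      exact ⟨(I, x), (mem_zs_iff g i j (i+H) (j+W) (I, x)).mpr
        ⟨((hrowsmem I).mp hI).1, hx, hcell⟩, rfl⟩
  have hrowsorted : rows.Pairwise (· < ·) :=
    List.Pairwise.filter _ (PySem.List.pairwise_lt_pyRange_one i (i+H))
  have hcolsorted : (C.filter (fun J => rows.any (fun I => cellZ g I J == some 0))).Pairwise (· < ·) :=
    List.Pairwise.filter _ (PySem.List.pairwise_lt_pyRange_one j (j+W))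
  have hrowsb : ∀ x ∈ rows, 0 ≤ x ∧ x < 10 := fun x hx => hR x (List.mem_of_mem_filter hx)
  have hcolsb : ∀ x ∈ C.filter (fun J => rows.any (fun I => cellZ g I J == some 0)),
      0 ≤ x ∧ x < 10 := fun x hx => hC x (List.mem_of_mem_filter hx)
  rw [fold_min_sorted _ rows 10 hfst hrowsorted (fun x hx => by have := hrowsb x hx; omega),
      fold_max_sorted _ rows 0 hfst hrowsorted (fun x hx => (hrowsb x hx).1),
      fold_min_sorted _ _ 10 hsnd hcolsorted (fun x hx => by have := hcolsb x hx; omega),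
      fold_max_sorted _ _ 0 hsnd hcolsorted (fun x hx => (hcolsb x hx).1)]
  clear_value rows
  clear hrowsdef hfst hsnd hrowsorted hcolsorted hrowsb hcolsb
  cases rows with
  | nil => simp [bbox2]
  | cons I rest =>
    obtain ⟨_, J, hJ, hcell⟩ := (hrowsmem I).mp (by simp)
    have hJin : J ∈ C.filter (fun J => (I :: rest).any (fun I' => cellZ g I' J == some 0)) := by
      rw [List.mem_filter, List.any_eq_true]
      exact ⟨hJ, I, by simp, by simpa using hcell⟩
    simp only [bbox2, zcols]
    cases hcc : C.filter (fun J => (I :: rest).any (fun I' => cellZ g I' J == some 0)) with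
    | nil =>
      rw [hcc] at hJin
      cases hJin
    | cons c crest =>
      simp only [List.headD_cons, List.getLastD_cons]

theorem clampIdx_lt {a : Type} (xs : List a) (p : Int) (hlo : -(xs.length : Int) <= p)
    (hhi : p < xs.length) : PySem.List.clampIdx xs.length p < xs.length := by
  simp only [PySem.List.clampIdx]
  split_ifs <;> omega

theorem pyGet?_read {a : Type} (xs : List a) (p : Int) (hlo : -(xs.length : Int) <= p)
    (hhi : p < xs.length) :
    PySem.List.pyGet? xs p = some (xs[PySem.List.clampIdx xs.length p]'(clampIdx_lt xs p hlo hhi)) := by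
  simp only [PySem.List.pyGet?, PySem.List.pyIdx?]
  by_cases hp : 0 <= p
  · rw [if_pos hp, if_pos hhi]
    have hidx : PySem.List.clampIdx xs.length p = p.toNat := by
      simp only [PySem.List.clampIdx]
      split_ifs <;> omega
    simp only [Option.bind_some]
    simp only [hidx]
    rw [List.getElem?_eq_getElem (by omega)]
  · rw [if_neg hp, if_pos hlo]
    have hidx : PySem.List.clampIdx xs.length p = xs.length - (-p).toNat := by
      simp only [PySem.List.clampIdx]
      split_ifs <;> omega
    simp only [Option.bind_some]
    simp only [hidx]
    rw [List.getElem?_eq_getElem (by omega)]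

-- assembling: A's fold quadruple rewritten to B's bbox makes the two ports' results identical
theorem f_eq_of_hyps (g : List (List Int)) (i j : Int)
    (hR : ∀ I ∈ PySem.List.pyRange i (i + whileH g j i (10 - i).toNat) 1, 0 ≤ I ∧ I < 10)
    (hC : ∀ J ∈ PySem.List.pyRange j (j + whileW g i j (10 - j).toNat) 1, 0 ≤ J ∧ J < 10)
    (hbridge : ∀ I ∈ PySem.List.pyRange i (i + whileH g j i (10 - i).toNat) 1,
      ((PySem.List.slice ((PySem.List.pyGet? g I).getD [])
          (some j) (some (j + whileW g i j (10 - j).toNat))).contains 0)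
        = (PySem.List.pyRange j (j + whileW g i j (10 - j).toNat) 1).any
            (fun J => cellZ g I J == some 0)) :
    f g i j = f_alt g i j := by
  have hq := main_quad g i j (whileW g i j (10 - j).toNat) (whileH g j i (10 - i).toNat) hR hC hbridge
  simp only [f, f_alt, runW_eq_whileW, runH_eq_whileH, hq]

-- the two ports agree on every input Pre_f admits
theorem f_eq_f_alt (g : List (List Int)) (i j : Int) (hpre : Pre_f g i j) :
    f g i j = f_alt g i j := by
  rcases hpre with ⟨hg, hrows, hi0, hi10, hj0, hj10⟩ | hrest
  · -- the natural 10×10 regime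
    apply f_eq_of_hyps
    · intro I hI
      have h := PySem.List.mem_pyRange_one.mp hI
      have hHb := whileH_bounds g j ((10 - i).toNat) i
      constructor <;> omega
    · intro J hJ
      have h := PySem.List.mem_pyRange_one.mp hJ
      have hWb := whileW_bounds g i ((10 - j).toNat) j
      constructor <;> omega
    · intro I hI
      have h := PySem.List.mem_pyRange_one.mp hI
      have hHb := whileH_bounds g j ((10 - i).toNat) i
      have hWb := whileW_bounds g i ((10 - j).toNat) j
      have hIlt : I.toNat < g.length := by omega
      exact contains_slice_eq_any g I j _ (by omega) hIlt
        (hrows _ (List.getElem_mem hIlt)) hj0 hWb.1 (by omega)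
  · -- degenerate regimes: both loops make zero iterations
    have hWH : whileW g i j ((10 - j).toNat) = 0 ∧ whileH g j i ((10 - i).toNat) = 0 := by
      rcases hrest with ⟨hi10', hj10'⟩ | ⟨hlo, hhi, hjlo, hjhi, hne⟩
      · constructor
        · rw [show (10 - j).toNat = 0 from by omega]
          rfl
        · rw [show (10 - i).toNat = 0 from by omega]
          rfl
      · -- readable non-5 start cell: both loops stop at once
        have hcN : PySem.List.clampIdx g.length i < g.length := clampIdx_lt g i hlo hhi
        have hgd : g.getD (PySem.List.clampIdx g.length i) [] = g[PySem.List.clampIdx g.length i]'hcN :=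
          List.getD_eq_getElem g [] hcN
        rw [hgd] at hjlo hjhi hne
        have hjc : PySem.List.clampIdx (g[PySem.List.clampIdx g.length i]'hcN).length j
            < (g[PySem.List.clampIdx g.length i]'hcN).length := clampIdx_lt _ j hjlo hjhi
        rw [List.getD_eq_getElem _ 0 hjc] at hne
        have hrowi : PySem.List.pyGet? g i = some (g[PySem.List.clampIdx g.length i]'hcN) :=
          pyGet?_read g i hlo hhi
        have hgetj := pyGet?_read (g[PySem.List.clampIdx g.length i]'hcN) j hjlo hjhi
        have hcne : ¬ cellZ g i j = some 5 := by
          simp [cellZ, hrowi, hgetj, hne]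
        exact ⟨whileW_stop g i j _ hcne, whileH_stop g j i _ hcne⟩
    apply f_eq_of_hyps
    · intro I hI
      have h := PySem.List.mem_pyRange_one.mp hI
      rw [hWH.2] at h
      omega
    · intro J hJ
      have h := PySem.List.mem_pyRange_one.mp hJ
      rw [hWH.1] at h
      omega
    · intro I hI
      have h := PySem.List.mem_pyRange_one.mp hI
      rw [hWH.2] at h
      exact absurd h (by omega)

-- ===== VERDICT (by name: the statement is the Claim_ definition above) =====
theorem f_spec : Claim_equal_f := by
  intro g i j _ hpre
  exact (f_eq_f_alt g i j hpre).symm ▸ rfl
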